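-- pv_equiv track=rewrite | github.com/protoi/ReversibleCircuitSimulation_v2 | circuit_generator.py | produce_multiples_of_2
-- ===== SOURCE A (Python) =====
-- def produce_multiples_of_2(n: int) -> list[int]:
--     """
--     takes a number like 110100 and returns a list containing [100000, 010000, 000100]
--     When you perform a logical OR on the list or add these numbers up
--     it results in the original value of n
--     :param n: an integer
--     :type n: int
--     :return: a list of numbers(powers of 2) when added up produce n
--     :rtype: list[int]
--     """
--     count = 0
--     answer = []
--     while n != 0:
--         if n & 0b1 == 1:
--             answer.append(1 << count)
--         n = n >> 1
--         count += 1
--     return answer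
-- ===== SOURCE B (Python) =====
-- def produce_multiples_of_2(n: int) -> list[int]:
--     # Recursive decomposition: bits of n//2 are the bits of n doubled; no position counter or shifts.
--     if n == 0:
--         return []
--     rest = [2 * x for x in produce_multiples_of_2(n // 2)]
--     return [1] + rest if n % 2 else rest
-- ===== Notes on version B (the rewrite author's own statement) =====
-- stated objective: simpler
-- what changed: Replaced the while-loop with a position counter and per-bit shifts/appends by a short recursion: decompose n//2 and double its powers, prepending 1 when n is odd.
import Mathlib
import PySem

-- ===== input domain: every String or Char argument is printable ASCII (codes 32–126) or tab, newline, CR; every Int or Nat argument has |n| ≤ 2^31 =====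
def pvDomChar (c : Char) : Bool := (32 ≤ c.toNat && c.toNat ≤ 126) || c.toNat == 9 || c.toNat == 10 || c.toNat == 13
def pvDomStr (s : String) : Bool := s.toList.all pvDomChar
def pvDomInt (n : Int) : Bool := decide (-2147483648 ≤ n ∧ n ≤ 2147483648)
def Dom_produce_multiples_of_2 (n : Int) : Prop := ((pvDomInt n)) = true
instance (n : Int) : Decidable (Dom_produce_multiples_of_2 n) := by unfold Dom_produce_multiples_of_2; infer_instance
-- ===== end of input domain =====

-- B replaces A's position-counter/shift loop with a recursive decomposition (bits of n//2 doubled); objective: simpler.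

-- ===== PORT A =====
-- while loop of A; the `0 < n` guard makes the recursion total: Python's guard is `n != 0`,
-- and for n < 0 Python diverges (those inputs are excluded by Pre_ below).
def pvALoop (n : Int) (count : Nat) (answer : List Int) : List Int :=
  if h : 0 < n then
    pvALoop (n >>> (1 : Nat)) (count + 1)
      (if PySem.Int.band n 1 == 1 then answer ++ [(1 : Int) <<< count] else answer)
  else answer
termination_by n.toNat
decreasing_by
  have h2 : n >>> (1 : Nat) = n / 2 := by
    rcases Int.eq_ofNat_of_zero_le (le_of_lt h) with ⟨m, rfl⟩
    simp [← Int.natCast_shiftRight, Nat.shiftRight_succ]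
  rw [h2]; omega

def produce_multiples_of_2 (n : Int) : List Int := pvALoop n 0 []

-- ===== PORT B =====
-- port of Source B; the `0 < n` guard totalises: Python B recurses forever for n < 0 (outside Pre_).
def produce_multiples_of_2_alt (n : Int) : List Int :=
  if h : 0 < n then
    let rest := (produce_multiples_of_2_alt (PySem.Int.floordiv n 2)).map (fun x => 2 * x)
    if PySem.Int.mod n 2 ≠ 0 then 1 :: rest else rest
  else []
termination_by n.toNat
decreasing_by
  have := PySem.Int.floordiv_eq_ediv_of_pos (a := n) (b := 2) (by omega)
  rw [this]; omega

-- ===== PRECONDITION & SPEC =====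
-- Pre_ excludes n < 0, on which Python A loops forever (n >> 1 stabilises at -1), returning nothing.
def Pre_produce_multiples_of_2 (n : Int) : Prop := 0 ≤ n
instance (n : Int) : Decidable (Pre_produce_multiples_of_2 n) := by unfold Pre_produce_multiples_of_2; infer_instance
def pvWitness_produce_multiples_of_2 : Int := (52)

def Spec_produce_multiples_of_2 (n : Int) (out : List Int) : Prop := out = produce_multiples_of_2_alt n
instance (n : Int) (out : List Int) : Decidable (Spec_produce_multiples_of_2 n out) := by unfold Spec_produce_multiples_of_2; infer_instance

-- ===== CLAIM (what is proved, stated in full; the proofs are below) =====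
def Claim_equal_produce_multiples_of_2 : Prop := ∀ (n : Int), Dom_produce_multiples_of_2 n → Pre_produce_multiples_of_2 n → Spec_produce_multiples_of_2 n (produce_multiples_of_2 n)

-- ===== LEMMAS AND PROOFS =====

lemma pv_shiftRight_one (n : Int) (h : 0 ≤ n) : n >>> (1 : Nat) = PySem.Int.floordiv n 2 := by
  rw [PySem.Int.floordiv_eq_ediv_of_pos (by omega)]
  rcases Int.eq_ofNat_of_zero_le h with ⟨m, rfl⟩
  simp [← Int.natCast_shiftRight, Nat.shiftRight_succ]

lemma pv_one_shiftLeft (c : Nat) : (1 : Int) <<< c = 2 ^ c := by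
  have : ((1 : Nat) <<< c : Nat) = 2 ^ c := by simp [Nat.shiftLeft_eq]
  exact_mod_cast congrArg (Nat.cast : Nat → Int) this

lemma pv_band_one (n : Int) (h : 0 ≤ n) : PySem.Int.band n 1 = n % 2 := by
  rcases Int.eq_ofNat_of_zero_le h with ⟨m, rfl⟩
  have h1 : PySem.Int.band (↑m) ((1 : Nat) : Int) = ↑(m &&& 1) := PySem.Int.band_natCast m 1
  rw [show ((1 : Nat) : Int) = 1 from rfl] at h1
  rw [h1, Nat.and_one_is_mod]
  omega

lemma pv_loop_eq (k : Nat) : ∀ (n : Int), 0 ≤ n → n.toNat ≤ k → ∀ (count : Nat) (answer : List Int),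
    pvALoop n count answer = answer ++ (produce_multiples_of_2_alt n).map (fun x => x * 2 ^ count) := by
  induction k with
  | zero =>
    intro n hn hk count answer
    have hn0 : n = 0 := by omega
    subst hn0
    rw [pvALoop, produce_multiples_of_2_alt]
    simp
  | succ k ih =>
    intro n hn hk count answer
    by_cases hpos : 0 < n
    · have hfd : PySem.Int.floordiv n 2 = n / 2 := PySem.Int.floordiv_eq_ediv_of_pos (by omega)
      have hrec : (n / 2).toNat ≤ k := by omega
      have hrec0 : 0 ≤ n / 2 := by omega
      have hm : PySem.Int.mod n 2 = n % 2 := PySem.Int.mod_eq_emod_of_pos (by omega)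
      rw [pvALoop]
      simp only [hpos, dite_true]
      rw [pv_band_one n hn, pv_shiftRight_one n hn, hfd, ih _ hrec0 hrec]
      conv_rhs => rw [produce_multiples_of_2_alt]
      simp only [hpos, dite_true, hfd, hm]
      have hmap : (produce_multiples_of_2_alt (n / 2)).map (fun x => x * 2 ^ (count + 1))
          = ((produce_multiples_of_2_alt (n / 2)).map (fun x => 2 * x)).map (fun x => x * 2 ^ count) := by
        rw [List.map_map]; apply List.map_congr_left; intro x _
        simp only [Function.comp_apply, pow_succ]; ring
      by_cases hodd : n % 2 = 1
      · simp only [hodd]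
        rw [if_pos (by simp), if_pos (by simp), List.map_cons, ← hmap, pv_one_shiftLeft]
        simp
      · have hmod : n % 2 = 0 := by omega
        simp only [hmod]
        rw [if_neg (by simp), if_neg (by simp), ← hmap]
    · have hn0 : n = 0 := by omega
      subst hn0
      rw [pvALoop, produce_multiples_of_2_alt]
      simp

-- ===== VERDICT (by name: the statement is the Claim_ definition above) =====
theorem produce_multiples_of_2_spec : Claim_equal_produce_multiples_of_2 := by
  intro n _ hpre
  unfold Spec_produce_multiples_of_2 produce_multiples_of_2
  rw [pv_loop_eq n.toNat n hpre le_rfl 0 []]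
  simp
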